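-- pv_equiv track=rewrite | github.com/KbWen/agentic-os | .agentcortex/tools/verify_agent_evidence.py | phase_order_status
-- ===== SOURCE A (Python) =====
-- PHASE_RULES = {
--     "tiny-fix": [],
--     "quick-win": ["bootstrap", "plan", "implement", "ship"],
--     "feature": ["bootstrap", "spec", "plan", "implement", "review", "test", "handoff", "ship"],
--     "architecture-change": ["bootstrap", "adr", "spec", "plan", "implement", "review", "test", "handoff", "ship"],
--     "hotfix": ["bootstrap", "research", "plan", "implement", "review", "test", "ship"],
-- }
--
-- def phase_order_status(classification: str, phases: list[str]) -> tuple[bool, bool]: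
--     required = PHASE_RULES.get(classification, [])
--     if not required:
--         return True, True
--     if not phases:
--         return False, False
--     if "ship" in phases and phases[-1] != "ship":
--         return False, False
--     seen: set[str] = set()
--     for phase in phases:
--         if phase not in required:
--             return False, False
--         phase_index = required.index(phase)
--         if any(required[index] not in seen for index in range(phase_index)):
--             return False, False
--         seen.add(phase)
--     return True, all(phase in seen for phase in required)
-- ===== SOURCE B (Python) =====
-- PHASE_RULES = {
--     "tiny-fix": [],
--     "quick-win": ["bootstrap", "plan", "implement", "ship"],
--     "feature": ["bootstrap", "spec", "plan", "implement", "review", "test", "handoff", "ship"],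
--     "architecture-change": ["bootstrap", "adr", "spec", "plan", "implement", "review", "test", "handoff", "ship"],
--     "hotfix": ["bootstrap", "research", "plan", "implement", "review", "test", "ship"],
-- }
--
-- def phase_order_status(classification: str, phases: list[str]) -> tuple[bool, bool]:
--     required = PHASE_RULES.get(classification, [])
--     if not required:
--         return True, True
--     ok = bool(phases) and ("ship" not in phases or phases[-1] == "ship") \
--         and all(p in required for p in phases)
--     if not ok:
--         return False, False
--     # validity = the required-indices of phases never jump past the running max + 1;
--     # completeness = the running max reaches the last required index.
--     hi = -1
--     for i in (required.index(p) for p in phases):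
--         if i > hi + 1:
--             return False, False
--         hi = max(hi, i)
--     return True, hi == len(required) - 1
-- ===== Notes on version B (the rewrite author's own statement) =====
-- stated objective: alternative
-- what changed: A's single loop with a seen-set and an inner scan over all predecessors of each phase is replaced by staged passes: one combined validity guard (non-empty, ship-last, all phases known), then a numeric fold over the required-indices maintaining a running maximum, valid iff no index jumps past max+1 and complete iff the max reaches the last index.
import Mathlib
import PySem

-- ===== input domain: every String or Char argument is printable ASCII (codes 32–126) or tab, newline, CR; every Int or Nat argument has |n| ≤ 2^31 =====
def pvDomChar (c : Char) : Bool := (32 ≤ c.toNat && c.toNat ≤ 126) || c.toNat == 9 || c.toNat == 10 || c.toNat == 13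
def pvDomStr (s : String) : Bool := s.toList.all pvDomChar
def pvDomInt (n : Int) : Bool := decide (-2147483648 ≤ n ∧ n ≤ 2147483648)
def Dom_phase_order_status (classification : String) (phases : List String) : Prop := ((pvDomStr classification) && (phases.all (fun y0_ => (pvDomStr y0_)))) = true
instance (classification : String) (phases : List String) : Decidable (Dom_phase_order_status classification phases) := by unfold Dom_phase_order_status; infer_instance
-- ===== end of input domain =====

-- B replaces A's seen-set loop with its inner predecessor scan by staged passes:
-- one combined validity guard, then a numeric running-max fold over required-indices
-- (objective: alternative decomposition of the same cost).

-- ===== PORT A =====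
def pyPhaseRules : PySem.Dict String (List String) :=
  PySem.Dict.ofList [
    ("tiny-fix", []),
    ("quick-win", ["bootstrap", "plan", "implement", "ship"]),
    ("feature", ["bootstrap", "spec", "plan", "implement", "review", "test", "handoff", "ship"]),
    ("architecture-change", ["bootstrap", "adr", "spec", "plan", "implement", "review", "test", "handoff", "ship"]),
    ("hotfix", ["bootstrap", "research", "plan", "implement", "review", "test", "ship"])]

-- A's for-loop over `phases` with the `seen` set; `(index?).getD 0` is safe: the
-- preceding membership guard makes `required.index(phase)` never raise.
def phaseLoopA (required : List String) : List String → PySem.Set String → Bool × Bool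
  | [], seen => (true, required.all (fun phase => PySem.Set.contains seen phase))
  | phase :: rest, seen =>
    if ¬ (phase ∈ required) then (false, false)
    else
      let phase_index := (PySem.List.index? required phase).getD 0
      if (PySem.List.pyRange 0 (phase_index : Int) 1).any
           (fun index => !(PySem.Set.contains seen (PySem.List.pyGetD required index ""))) then
        (false, false)
      else phaseLoopA required rest (PySem.Set.add seen phase)

def phase_order_status (classification : String) (phases : List String) : Bool × Bool :=
  let required := PySem.Dict.getD pyPhaseRules classification []
  if required = [] then (true, true)
  else if phases = [] then (false, false)
  else if phases.contains "ship" && !((PySem.List.pyGetD phases (-1) "") == "ship") then (false, false)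
  else phaseLoopA required phases PySem.Set.empty

-- ===== PORT B =====
-- B's numeric fold: a running maximum `hi : Int` over the index list.
def hiFold (reqLen : Int) : List Int → Int → Bool × Bool
  | [], hi => (true, decide (hi = reqLen - 1))
  | i :: rest, hi => if i > hi + 1 then (false, false) else hiFold reqLen rest (max hi i)

def phase_order_status_alt (classification : String) (phases : List String) : Bool × Bool :=
  let required := PySem.Dict.getD pyPhaseRules classification []
  if required = [] then (true, true)
  else
    let ok := (phases ≠ []) ∧
      ((¬ phases.contains "ship" = true) ∨ (PySem.List.pyGetD phases (-1) "") = "ship") ∧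
      (∀ p ∈ phases, p ∈ required)
    if ¬ ok then (false, false)
    else
      hiFold (PySem.List.len required)
        (phases.map (fun p => (((PySem.List.index? required p).getD 0 : Nat) : Int))) (-1)

-- ===== PRECONDITION & SPEC =====
def Spec_phase_order_status (classification : String) (phases : List String) (out : Bool × Bool) : Prop := out = phase_order_status_alt classification phases
instance (classification : String) (phases : List String) (out : Bool × Bool) : Decidable (Spec_phase_order_status classification phases out) := by unfold Spec_phase_order_status; infer_instance

-- ===== CLAIM (what is proved, stated in full; the proofs are below) =====
def Claim_equal_phase_order_status : Prop := ∀ (classification : String) (phases : List String), Dom_phase_order_status classification phases → Spec_phase_order_status classification phases (phase_order_status classification phases)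

-- ===== LEMMAS AND PROOFS =====

-- the lookup reduces to a literal dict
lemma rules_mk : pyPhaseRules = PySem.Dict.mk [
    ("tiny-fix", []),
    ("quick-win", ["bootstrap", "plan", "implement", "ship"]),
    ("feature", ["bootstrap", "spec", "plan", "implement", "review", "test", "handoff", "ship"]),
    ("architecture-change", ["bootstrap", "adr", "spec", "plan", "implement", "review", "test", "handoff", "ship"]),
    ("hotfix", ["bootstrap", "research", "plan", "implement", "review", "test", "ship"])] := by decide

-- whatever the classification, the rule list looked up has no duplicate phases
lemma rules_nodup (c : String) : (PySem.Dict.getD pyPhaseRules c []).Nodup := by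
  rw [PySem.Dict.getD_eq_get?_getD, rules_mk]
  simp only [PySem.Dict.get?_mk_cons]
  repeat' split
  all_goals simp [PySem.Dict.get?]

-- membership in the prefix `take covered` of a duplicate-free list is exactly
-- "the index is below covered"
lemma mem_take_iff_index_lt (required : List String) (hnd : required.Nodup)
    (covered j : Nat) (hj : j < required.length) :
    required[j] ∈ required.take covered ↔ j < covered := by
  rw [List.mem_take_iff_getElem]
  constructor
  · rintro ⟨i, hi, hieq⟩
    have : i = j := (List.Nodup.getElem_inj_iff hnd).mp hieq
    omega
  · intro h
    exact ⟨j, by omega, rfl⟩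

-- if some phase is unknown, A's loop returns (false, false)
lemma loopA_missing (required : List String) :
    ∀ (phases : List String) (seen : PySem.Set String),
    (∃ p ∈ phases, p ∉ required) → phaseLoopA required phases seen = (false, false) := by
  intro phases
  induction phases with
  | nil => rintro seen ⟨p, hp, _⟩; cases hp
  | cons phase rest ih =>
    rintro seen ⟨p, hp, hpn⟩
    simp only [phaseLoopA]
    by_cases hmem : phase ∈ required
    · simp only [hmem, not_true_eq_false, if_false]
      split
      · rfl
      · apply ih
        rcases List.mem_cons.mp hp with h | h
        · exact absurd (h ▸ hmem) hpn
        · exact ⟨p, h, hpn⟩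
    · simp [hmem]

-- core: when every phase is known, A's seen-set loop equals B's running-max fold
-- under the invariant "seen = the first (hi+1) required phases"
lemma loop_eq (required : List String) (hnd : required.Nodup) :
    ∀ (phases : List String) (seen : PySem.Set String) (covered : Nat),
    covered ≤ required.length →
    (∀ x, PySem.Set.contains seen x = true ↔ x ∈ required.take covered) →
    (∀ p ∈ phases, p ∈ required) →
    phaseLoopA required phases seen =
      hiFold (PySem.List.len required)
        (phases.map (fun p => (((PySem.List.index? required p).getD 0 : Nat) : Int)))
        ((covered : Int) - 1) := by
  intro phases
  induction phases with
  | nil =>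
    intro seen covered hcov hseen _
    simp only [phaseLoopA, List.map_nil, hiFold, Prod.mk.injEq, true_and]
    rcases Nat.lt_or_ge covered required.length with hlt | hge
    · -- covered < length: required[covered] is not yet seen, both sides false
      have hne : ¬ ((covered : Int) - 1 = PySem.List.len required - 1) := by
        simp only [PySem.List.len_eq]; omega
      simp only [hne, decide_false]
      apply List.all_eq_false.mpr
      refine ⟨required[covered], List.getElem_mem hlt, ?_⟩
      simp only [Bool.not_eq_true]
      apply Bool.eq_false_iff.mpr
      intro h
      have := (mem_take_iff_index_lt required hnd covered covered hlt).mp ((hseen _).mp h)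
      omega
    · have hc : covered = required.length := le_antisymm hcov hge
      subst hc
      have heq : ((required.length : Nat) : Int) - 1 = PySem.List.len required - 1 := by
        simp [PySem.List.len_eq]
      simp only [heq, decide_true]
      apply List.all_eq_true.mpr
      intro x hx
      exact (hseen x).mpr (by simpa [List.take_length] using hx)
  | cons phase rest ih =>
    intro seen covered hcov hseen hall
    have hmem : phase ∈ required := hall phase (List.mem_cons_self)
    simp only [phaseLoopA, List.map_cons, hiFold, hmem, not_true_eq_false, if_false]
    obtain ⟨j, hidx⟩ := Option.isSome_iff_exists.mp
      ((PySem.List.index?_isSome_iff required phase).mpr hmem)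
    obtain ⟨hj, hget, _⟩ := PySem.List.getElem_of_index?_eq_some hidx
    simp only [hidx, Option.getD_some]
    -- A's inner any-scan fires exactly when the index jumps past covered = hi+1
    have hany : (PySem.List.pyRange 0 (j : Int) 1).any
        (fun index => !(PySem.Set.contains seen (PySem.List.pyGetD required index ""))) =
        decide (covered < j) := by
      rcases Nat.lt_or_ge covered j with hlt | hge
      · simp only [hlt, decide_true]
        apply List.any_eq_true.mpr
        refine ⟨(covered : Int), PySem.List.mem_pyRange_one.mpr ⟨by omega, by omega⟩, ?_⟩
        have hcl : covered < required.length := lt_trans hlt hj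
        have h1 : PySem.List.pyGetD required ((covered : Nat) : Int) "" = required[covered] := by
          rw [PySem.List.pyGetD_natCast]
          exact List.getD_eq_getElem _ _ hcl
        rw [h1, Bool.not_eq_true']
        apply Bool.eq_false_iff.mpr
        intro h
        have := (mem_take_iff_index_lt required hnd covered covered hcl).mp ((hseen _).mp h)
        omega
      · simp only [Nat.not_lt.mpr hge, decide_false]
        apply List.any_eq_false.mpr
        intro i hi
        obtain ⟨h0, hiu⟩ := PySem.List.mem_pyRange_one.mp hi
        have hil : i.toNat < required.length := by omega
        have h1 : PySem.List.pyGetD required i "" = required[i.toNat] :=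
          PySem.List.pyGetD_eq_getElem required "" h0 (by omega)
        rw [h1]
        simp only [Bool.not_eq_true', Bool.not_eq_false]
        exact (hseen _).mpr
          ((mem_take_iff_index_lt required hnd covered i.toNat hil).mpr (by omega))
    rw [hany]
    have hrest : ∀ p ∈ rest, p ∈ required := fun p hp => hall p (List.mem_cons_of_mem _ hp)
    rcases Nat.lt_or_ge covered j with hlt | hge
    · simp [hlt]
    · have hnotgt : ¬ (((j : Nat) : Int) > ((covered : Int) - 1) + 1) := by omega
      simp only [Nat.not_lt.mpr hge, decide_false, Bool.false_eq_true, if_false,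
        if_neg hnotgt]
      by_cases hje : j = covered
      · subst hje
        have hmax : max ((j : Int) - 1) ((j : Nat) : Int) = ((j + 1 : Nat) : Int) - 1 := by
          omega
        rw [hmax]
        apply ih _ _ (by omega) _ hrest
        intro x
        rw [PySem.Set.contains_iff, PySem.Set.mem_add,
          List.take_add_one, List.getElem?_eq_getElem hj]
        constructor
        · rintro (h | h)
          · exact List.mem_append_left _ ((hseen x).mp (by rwa [PySem.Set.contains_iff]))
          · subst h; exact List.mem_append_right _ (by simp [hget])
        · intro h
          rcases List.mem_append.mp h with h | h
          · exact Or.inl (by rw [← PySem.Set.contains_iff]; exact (hseen x).mpr h)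
          · simp only [Option.toList_some, List.mem_singleton] at h
            subst h; exact Or.inr hget
      · have hjlt : j < covered := lt_of_le_of_ne hge hje
        have hmax : max ((covered : Int) - 1) ((j : Nat) : Int) = (covered : Int) - 1 := by
          omega
        rw [hmax]
        apply ih _ _ hcov _ hrest
        intro x
        have hphase_seen : phase ∈ required.take covered := by
          rw [← hget]
          exact (mem_take_iff_index_lt required hnd covered j hj).mpr hjlt
        rw [PySem.Set.contains_iff, PySem.Set.mem_add]
        constructor
        · rintro (h | h)
          · exact (hseen x).mp (by rwa [PySem.Set.contains_iff])
          · subst h; exact hphase_seen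
        · intro h; exact Or.inl ((PySem.Set.contains_iff _ _).mp ((hseen x).mpr h))

-- ===== VERDICT (by name: the statement is the Claim_ definition above) =====
theorem phase_order_status_spec : Claim_equal_phase_order_status := by
  intro classification phases _
  unfold Spec_phase_order_status phase_order_status phase_order_status_alt
  simp only
  split
  · rfl
  · by_cases hp : phases = []
    · simp [hp]
    · rw [if_neg hp]
      by_cases hship : phases.contains "ship" = true ∧
          ¬ (PySem.List.pyGetD phases (-1) "" = "ship")
      · have hA : (phases.contains "ship" &&
            !((PySem.List.pyGetD phases (-1) "") == "ship")) = true := by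
          simp [hship.2, show "ship" ∈ phases by simpa using hship.1]
        rw [if_pos hA, if_pos]
        intro hok
        exact absurd (hok.2.1.resolve_left (by simp [show "ship" ∈ phases by simpa using hship.1])) hship.2
      · have hA : (phases.contains "ship" &&
            !((PySem.List.pyGetD phases (-1) "") == "ship")) ≠ true := by
          simp only [Bool.and_eq_true, Bool.not_eq_true', beq_eq_false_iff_ne, ne_eq]
          intro ⟨h1, h2⟩; exact hship ⟨h1, h2⟩
        rw [if_neg hA]
        by_cases hall : ∀ p ∈ phases, p ∈ (PySem.Dict.getD pyPhaseRules classification [])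
        · rw [if_neg (by
            push Not
            refine ⟨hp, ?_, hall⟩
            by_cases h1 : phases.contains "ship" = true
            · exact Or.inr (by_contra fun h2 => hA (by simp [h2, show "ship" ∈ phases by simpa using h1]))
            · exact Or.inl h1)]
          exact loop_eq _ (rules_nodup classification) phases PySem.Set.empty 0
            (Nat.zero_le _) (by intro x; simp [PySem.Set.empty]) hall
        · rw [if_pos (by intro hok; exact hall hok.2.2)]
          apply loopA_missing
          push Not at hall
          exact hall
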